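-- pv_equiv track=rewrite | github.com/lengio/challenge-sara-lins | main.py | group_activities_by_user
-- ===== SOURCE A (Python) =====
-- def group_activities_by_user(data):
--     """Group all activities by user and order by first_seen_at"""
--     user_activities = {}
--     for activity in data["activities"]:  # O(n)
--         if activity["user_id"] not in user_activities:
--             user_activities[activity["user_id"]] = []
--         user_activities[activity["user_id"]].append(activity)
--
--     # order user activities by their first_seen_at
--     for user_id in user_activities:  # O(n) x O(m log m) = O(n x m_log_m)
--         user_activities[user_id] = sorted(
--             user_activities[user_id], key=lambda k: k["first_seen_at"]
--         )
--
--     return user_activities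
-- ===== SOURCE B (Python) =====
-- def group_activities_by_user(data):
--     """Group all activities by user and order by first_seen_at"""
--     sorted_acts = sorted(data["activities"], key=lambda k: k["first_seen_at"])
--     users = list(dict.fromkeys(a["user_id"] for a in data["activities"]))
--     return {u: [a for a in sorted_acts if a["user_id"] == u] for u in users}
-- ===== Notes on version B (the rewrite author's own statement) =====
-- stated objective: alternative
-- what changed: Replaces A's group-into-dict-then-sort-each-group with: one global stable sort of all activities by first_seen_at, the deduplicated user list in first-appearance order, and a dict comprehension that builds each user's group by filtering the sorted list (stability makes per-user order identical).
import Mathlib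
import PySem

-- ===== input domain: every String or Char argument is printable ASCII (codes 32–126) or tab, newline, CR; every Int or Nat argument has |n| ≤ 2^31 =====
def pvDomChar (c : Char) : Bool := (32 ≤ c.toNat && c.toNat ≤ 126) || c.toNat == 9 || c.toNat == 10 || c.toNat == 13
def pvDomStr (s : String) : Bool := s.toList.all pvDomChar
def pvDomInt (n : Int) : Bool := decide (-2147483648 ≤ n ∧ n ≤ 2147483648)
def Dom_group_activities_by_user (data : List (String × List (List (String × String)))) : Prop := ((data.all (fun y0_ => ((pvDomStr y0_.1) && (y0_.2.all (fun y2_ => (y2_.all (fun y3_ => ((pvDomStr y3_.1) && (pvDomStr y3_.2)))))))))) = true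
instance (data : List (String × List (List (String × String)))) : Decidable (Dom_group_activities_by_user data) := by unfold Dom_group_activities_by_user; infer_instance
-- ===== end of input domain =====

-- B changes the algorithm: A groups into a dict and then sorts each group; B sorts the whole
-- activity list once stably, takes the deduplicated user list in first-appearance order, and
-- builds each user's group by filtering the sorted list. Same dict; neither mutates its input.

-- ===== PORT A =====
-- shared accessors: activity["user_id"] and activity["first_seen_at"] (KeyError guarded by Pre_)
def pvUid (act : List (String × String)) : String :=
  ((PySem.Dict.mk act).get? "user_id").getD ""
def pvFsa (act : List (String × String)) : String :=
  ((PySem.Dict.mk act).get? "first_seen_at").getD ""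

def group_activities_by_user (data : List (String × List (List (String × String)))) : List (String × List (List (String × String))) :=
  let acts := ((PySem.Dict.mk data).get? "activities").getD []
  let ua := acts.foldl (fun d act =>
      let d := if d.contains (pvUid act) then d else d.insert (pvUid act) []
      d.modify (pvUid act) [] (fun l => l ++ [act])) (PySem.Dict.mk [])
  let ua2 := ua.keys.foldl (fun d u =>
      d.insert u (PySem.List.sorted (d.getD u []) pvFsa false)) ua
  ua2.items

-- ===== PORT B =====
def group_activities_by_user_alt (data : List (String × List (List (String × String)))) : List (String × List (List (String × String))) :=
  let acts := ((PySem.Dict.mk data).get? "activities").getD []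
  let sortedActs := PySem.List.sorted acts pvFsa false
  let users := PySem.List.dedup (acts.map pvUid)
  users.map (fun u => (u, sortedActs.filter (fun a => pvUid a == u)))

-- ===== PRECONDITION & SPEC =====
-- Pre_ excludes exactly the inputs where the Python raises KeyError: a missing "activities" key,
-- or an activity without "user_id" or "first_seen_at".
def Pre_group_activities_by_user (data : List (String × List (List (String × String)))) : Prop :=
  ((PySem.Dict.mk data).get? "activities").isSome = true ∧
  ∀ act ∈ ((PySem.Dict.mk data).get? "activities").getD [],
    ((PySem.Dict.mk act).get? "user_id").isSome = true ∧
    ((PySem.Dict.mk act).get? "first_seen_at").isSome = true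
instance (data : List (String × List (List (String × String)))) : Decidable (Pre_group_activities_by_user data) := by unfold Pre_group_activities_by_user; infer_instance

def pvWitness_group_activities_by_user : (List (String × List (List (String × String)))) :=
  [("activities",
    [[("user_id", "u1"), ("first_seen_at", "b")],
     [("user_id", "u2"), ("first_seen_at", "a")],
     [("user_id", "u1"), ("first_seen_at", "a")]])]

def Spec_group_activities_by_user (data : List (String × List (List (String × String)))) (out : List (String × List (List (String × String)))) : Prop := out = group_activities_by_user_alt data
instance (data : List (String × List (List (String × String)))) (out : List (String × List (List (String × String)))) : Decidable (Spec_group_activities_by_user data out) := by unfold Spec_group_activities_by_user; infer_instance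

-- ===== CLAIM (what is proved, stated in full; the proofs are below) =====
def Claim_equal_group_activities_by_user : Prop := ∀ (data : List (String × List (List (String × String)))), Dom_group_activities_by_user data → Pre_group_activities_by_user data → Spec_group_activities_by_user data (group_activities_by_user data)

-- ===== LEMMAS AND PROOFS =====

-- abbreviation used only in the proofs
def pvGroup (acts : List (List (String × String))) (u : String) : List (List (String × String)) :=
  acts.filter (fun a => pvUid a == u)

-- insertBy puts x in front when it goes before the head (or the list is empty)
theorem pv_insertBy_head {α : Type} (bef : α → α → Bool) (x : α) (l : List α)
    (h : ∀ y ∈ l, bef x y = true) :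
    PySem.List.insertBy bef x l = x :: l := by
  cases l with
  | nil => rfl
  | cons a t => simp [PySem.List.insertBy, h a List.mem_cons_self]

-- filtering commutes with a single stable insertion into a key-sorted list
theorem pv_filter_insertBy {α κ : Type} [LinearOrder κ] (key : α → κ) (p : α → Bool) (x : α) :
    ∀ (s : List α), s.Pairwise (fun a b => key a ≤ key b) →
    (PySem.List.insertBy (fun a b => decide (key a < key b)) x s).filter p =
      if p x then PySem.List.insertBy (fun a b => decide (key a < key b)) x (s.filter p)
      else s.filter p := by
  intro s
  induction s with
  | nil =>
    intro _
    by_cases hp : p x = true <;> simp [PySem.List.insertBy, List.filter, hp]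
  | cons a t ih =>
    intro hpw
    have hpw' : t.Pairwise (fun a b => key a ≤ key b) := hpw.of_cons
    have hle : ∀ y ∈ t, key a ≤ key y := by
      intro y hy; exact (List.pairwise_cons.mp hpw).1 y hy
    by_cases hxa : key x < key a
    · have hstep : PySem.List.insertBy (fun a b => decide (key a < key b)) x (a :: t) = x :: a :: t := by
        simp [PySem.List.insertBy, hxa]
      rw [hstep]
      by_cases hp : p x = true
      · have hhead : ∀ y ∈ (a :: t).filter p, decide (key x < key y) = true := by
          intro y hy
          have : y ∈ (a :: t) := List.mem_of_mem_filter hy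
          rcases List.mem_cons.mp this with h | h
          · subst h; simpa using hxa
          · simpa using lt_of_lt_of_le hxa (hle y h)
        rw [pv_insertBy_head _ _ _ hhead]
        simp [List.filter_cons, hp]
      · simp [List.filter_cons, hp]
    · have hstep : PySem.List.insertBy (fun a b => decide (key a < key b)) x (a :: t)
          = a :: PySem.List.insertBy (fun a b => decide (key a < key b)) x t := by
        simp [PySem.List.insertBy, hxa]
      rw [hstep]
      by_cases hp : p x = true <;> by_cases hpa : p a = true <;>
        simp [hp, hpa, ih hpw', PySem.List.insertBy, hxa]

-- filtering commutes with the stable sort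
theorem pv_filter_sorted {α κ : Type} [LinearOrder κ] (key : α → κ) (p : α → Bool) (xs : List α) :
    (PySem.List.sorted xs key false).filter p = PySem.List.sorted (xs.filter p) key false := by
  induction xs using List.reverseRecOn with
  | nil => rfl
  | append_singleton xs x ih =>
    have hA : PySem.List.sorted (xs ++ [x]) key false
        = PySem.List.insertBy (fun a b => decide (key a < key b)) x (PySem.List.sorted xs key false) := by
      rw [PySem.List.sorted_eq_foldl_insertBy, PySem.List.sorted_eq_foldl_insertBy, List.foldl_append]
      rfl
    rw [hA, pv_filter_insertBy key p x _ (PySem.List.sorted_pairwise xs key), List.filter_append, ih]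
    by_cases hp : p x = true
    · have hB : PySem.List.sorted (xs.filter p ++ [x]) key false
          = PySem.List.insertBy (fun a b => decide (key a < key b)) x (PySem.List.sorted (xs.filter p) key false) := by
        rw [PySem.List.sorted_eq_foldl_insertBy, PySem.List.sorted_eq_foldl_insertBy, List.foldl_append]
        rfl
      simp [hp, hB]
    · simp [hp]

-- A's per-activity step (insert-if-absent then append) is exactly modify with default []
theorem pv_stepA_eq_modify (d : PySem.Dict String (List (List (String × String)))) (act : List (String × String)) :
    (if d.contains (pvUid act) then d else d.insert (pvUid act) []).modify (pvUid act) [] (fun l => l ++ [act])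
      = d.modify (pvUid act) [] (fun l => l ++ [act]) := by
  by_cases h : d.contains (pvUid act) = true
  · simp [h]
  · have h' : d.contains (pvUid act) = false := by simpa using h
    simp [h', PySem.Dict.modify, PySem.Dict.getD_insert_self,
      PySem.Dict.insert_insert_self, PySem.Dict.getD_of_not_contains d _ h']

-- the grouping fold, restated over key/value pairs
theorem pv_group_fold_eq (acts : List (List (String × String))) (d : PySem.Dict String (List (List (String × String)))) :
    acts.foldl (fun d act => d.modify (pvUid act) [] (fun l => l ++ [act])) d
      = (acts.map (fun a => (pvUid a, a))).foldl (fun d p => d.modify p.1 [] (fun l => l ++ [p.2])) d := by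
  rw [List.foldl_map]

theorem pv_group_fold_getD (acts : List (List (String × String))) (d : PySem.Dict String (List (List (String × String)))) (u : String) :
    (acts.foldl (fun d act => d.modify (pvUid act) [] (fun l => l ++ [act])) d).getD u []
      = d.getD u [] ++ pvGroup acts u := by
  rw [pv_group_fold_eq, PySem.Dict.getD_foldl_modify_append]
  unfold pvGroup
  congr 1
  rw [List.filter_map, List.map_map]
  simp [Function.comp_def]

-- A's second loop: re-inserting sorted values at each (distinct, present) key maps over the items
theorem pv_resort_fold_items (F : List (List (String × String)) → List (List (String × String))) :
    ∀ (ks : List String) (d : PySem.Dict String (List (List (String × String)))),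
    d.keys.Nodup → ks.Nodup → (∀ k ∈ ks, d.contains k = true) →
    (ks.foldl (fun d u => d.insert u (F (d.getD u []))) d).items
      = d.items.map (fun kv => if kv.1 ∈ ks then (kv.1, F kv.2) else kv) := by
  intro ks
  induction ks with
  | nil => intro d _ _ _; simp
  | cons k ks ih =>
    intro d hnd hks hcont
    rw [List.foldl_cons]
    set d' := d.insert k (F (d.getD k [])) with hd'
    have hck : d.contains k = true := hcont k (List.mem_cons_self)
    have hitems' : d'.items = d.items.map (fun p => if p.1 == k then (k, F (d.getD k [])) else p) :=
      PySem.Dict.items_insert_of_contains _ _ hck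
    have hkeys' : d'.keys = d.keys := PySem.Dict.keys_insert_of_contains _ _ hck
    have hrec := ih d' (hkeys' ▸ hnd) hks.of_cons (by
      intro k' hk'
      rw [PySem.Dict.contains_insert]
      simp [hcont k' (List.mem_cons_of_mem _ hk')])
    rw [hrec, hitems', List.map_map]
    apply List.map_congr_left
    intro p hp
    have hkne : k ∉ ks := (List.nodup_cons.mp hks).1
    by_cases hpk : p.1 = k
    · have hgd : d.getD k [] = p.2 := by
        have hmem : (k, p.2) ∈ d.items := by rw [← hpk]; exact hp
        exact PySem.Dict.getD_of_mem_items _ hmem hnd _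
      simp [hpk, hgd, hkne]
    · simp [hpk, List.mem_cons]

theorem pv_keys_group_fold (acts : List (List (String × String))) (d : PySem.Dict String (List (List (String × String)))) :
    (acts.foldl (fun d act => d.modify (pvUid act) [] (fun l => l ++ [act])) d).keys
      = PySem.Set.update d.keys (acts.map pvUid) := by
  rw [pv_group_fold_eq]
  have := PySem.Dict.keys_foldl_modify_key (acts.map (fun a => (pvUid a, a))) (fun p => p.1)
    ([]) (fun d p l => l ++ [p.2]) d
  simp only [List.map_map] at this
  simpa [Function.comp_def] using this

-- the main equality, stated on the activity list
theorem pv_main (acts : List (List (String × String))) :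
    (let ua := acts.foldl (fun d act =>
        let d := if d.contains (pvUid act) then d else d.insert (pvUid act) []
        d.modify (pvUid act) [] (fun l => l ++ [act])) (PySem.Dict.mk [])
     let ua2 := ua.keys.foldl (fun d u =>
        d.insert u (PySem.List.sorted (d.getD u []) pvFsa false)) ua
     ua2.items)
    = (PySem.List.dedup (acts.map pvUid)).map
        (fun u => (u, (PySem.List.sorted acts pvFsa false).filter (fun a => pvUid a == u))) := by
  dsimp only
  rw [PySem.List.foldl_congr_mem _ _
      (fun d act => d.modify (pvUid act) [] (fun l => l ++ [act])) _
      (fun acc x _ => pv_stepA_eq_modify acc x)]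
  set g := acts.foldl (fun d act => d.modify (pvUid act) [] (fun l => l ++ [act]))
      (PySem.Dict.mk []) with hg
  have hkeysg : g.keys = PySem.Set.ofList (acts.map pvUid) := by
    rw [hg, pv_keys_group_fold]
    rfl
  have hnodg : g.keys.Nodup := hkeysg ▸ PySem.Set.nodup_ofList _
  have hgetg : ∀ u, g.getD u [] = pvGroup acts u := by
    intro u
    rw [hg, pv_group_fold_getD]
    simp [PySem.Dict.getD, PySem.Dict.get?]
  rw [pv_resort_fold_items (fun v => PySem.List.sorted v pvFsa false) g.keys g hnodg hnodg
      (fun k hk => by rw [PySem.Dict.contains_eq_decide_mem_keys]; simpa using hk),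
    PySem.Dict.items_eq_map_keys g hnodg [], List.map_map, hkeysg,
    PySem.List.dedup_eq_ofList]
  apply List.map_congr_left
  intro u hu
  have h3 : (PySem.List.sorted acts pvFsa false).filter (fun a => pvUid a == u)
      = PySem.List.sorted (pvGroup acts u) pvFsa false := by
    unfold pvGroup
    exact pv_filter_sorted pvFsa (fun a => pvUid a == u) acts
  simp only [Function.comp_def, hgetg, h3, hu, if_pos]

-- ===== VERDICT (by name: the statement is the Claim_ definition above) =====
theorem group_activities_by_user_spec : Claim_equal_group_activities_by_user := by
  intro data _ _
  unfold Spec_group_activities_by_user group_activities_by_user group_activities_by_user_alt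
  exact pv_main _
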